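-- pv_equiv track=rewrite | github.com/jssonx/algo-playground | weekly-contest/2576.find-the-maximum-number-of-marked-indices.py | maxNumOfMarkedIndices
-- ===== SOURCE A (Python) =====
-- from typing import List
--
-- def maxNumOfMarkedIndices(nums: List[int]) -> int:
--     nums = sorted(nums)
--     n = len(nums)
--     mid = n // 2
--     j = mid
--     res = 0
--     for i in range(0, mid):
--         while j < n and nums[j] < nums[i] * 2:
--             j += 1
--         if j < n:
--             res += 2
--             j += 1
--     return res
-- ===== SOURCE B (Python) =====
-- from typing import List
--
-- def maxNumOfMarkedIndices(nums: List[int]) -> int: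
--     s = sorted(nums)
--     n = len(s)
--
--     def feasible(k: int) -> bool:
--         # pair the k smallest with the k largest: s[i] with s[n-k+i]
--         return all(2 * s[i] <= s[n - k + i] for i in range(k))
--
--     k = n // 2
--     while not feasible(k):
--         k -= 1
--     return 2 * k
-- ===== Notes on version B (the rewrite author's own statement) =====
-- stated objective: alternative
-- what changed: Replaced the forward two-pointer greedy sweep over the sorted array with a descending search for the largest pair count k whose fixed pairing (k smallest against k largest, s[i] with s[n-k+i]) is feasible, returning 2*k.
import Mathlib
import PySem

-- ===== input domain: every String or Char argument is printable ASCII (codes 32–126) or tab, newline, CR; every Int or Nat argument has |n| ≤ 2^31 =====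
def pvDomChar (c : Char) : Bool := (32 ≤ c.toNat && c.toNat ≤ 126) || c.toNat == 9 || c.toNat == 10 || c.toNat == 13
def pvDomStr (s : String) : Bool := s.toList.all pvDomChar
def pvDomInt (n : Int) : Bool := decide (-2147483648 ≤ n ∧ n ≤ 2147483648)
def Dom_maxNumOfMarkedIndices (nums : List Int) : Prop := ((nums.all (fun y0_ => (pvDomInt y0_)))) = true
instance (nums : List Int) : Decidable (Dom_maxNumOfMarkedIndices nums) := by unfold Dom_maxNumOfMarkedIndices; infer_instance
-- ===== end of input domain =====

-- B replaces A's forward two-pointer sweep with a descending search over the answer k,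
-- checking the fixed pairing "k smallest vs k largest"; objective: alternative (same sort-dominated cost).

-- ===== PORT A =====
-- the inner `while j < n and nums[j] < nums[i] * 2` loop (x = nums[i])
def pvAdvance (s : List Int) (x : Int) (j : Nat) : Nat :=
  if h : j < s.length ∧ s.getD j 0 < x * 2 then pvAdvance s x (j + 1) else j
termination_by s.length - j
decreasing_by omega

-- the `for i in range(0, mid)` loop with state (j, res); j' is the pointer after the while
def pvALoop (s : List Int) (i j : Nat) (res : Int) : Int :=
  if i < s.length / 2 then
    if pvAdvance s (s.getD i 0) j < s.length then
      pvALoop s (i + 1) (pvAdvance s (s.getD i 0) j + 1) (res + 2)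
    else pvALoop s (i + 1) (pvAdvance s (s.getD i 0) j) res
  else res
termination_by s.length / 2 - i

def maxNumOfMarkedIndices (nums : List Int) : Int :=
  let s := PySem.List.sorted nums (fun x => x) false
  pvALoop s 0 (s.length / 2) 0

-- ===== PORT B =====
-- feasible(k): all(2*s[i] <= s[n-k+i] for i in range(k))
def pvFeasible (s : List Int) (k : Nat) : Bool :=
  (List.range k).all (fun i => decide (2 * s.getD i 0 ≤ s.getD (s.length - k + i) 0))

-- `k = n // 2; while not feasible(k): k -= 1` (feasible(0) is vacuously true, so 0 is the floor)
def pvBScan (s : List Int) : Nat → Nat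
  | 0 => 0
  | k + 1 => if pvFeasible s (k + 1) then k + 1 else pvBScan s k

def maxNumOfMarkedIndices_alt (nums : List Int) : Int :=
  let s := PySem.List.sorted nums (fun x => x) false
  2 * (pvBScan s (s.length / 2) : Int)

-- ===== PRECONDITION & SPEC =====
def Spec_maxNumOfMarkedIndices (nums : List Int) (out : Int) : Prop := out = maxNumOfMarkedIndices_alt nums
instance (nums : List Int) (out : Int) : Decidable (Spec_maxNumOfMarkedIndices nums out) := by unfold Spec_maxNumOfMarkedIndices; infer_instance

-- ===== CLAIM (what is proved, stated in full; the proofs are below) =====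
def Claim_equal_maxNumOfMarkedIndices : Prop := ∀ (nums : List Int), Dom_maxNumOfMarkedIndices nums → Spec_maxNumOfMarkedIndices nums (maxNumOfMarkedIndices nums)

-- ===== LEMMAS AND PROOFS =====

-- greedy success counter: the Nat-valued mirror of pvALoop
def pvG (s : List Int) (i j : Nat) : Nat :=
  if i < s.length / 2 then
    if pvAdvance s (s.getD i 0) j < s.length then
      pvG s (i + 1) (pvAdvance s (s.getD i 0) j + 1) + 1
    else pvG s (i + 1) (pvAdvance s (s.getD i 0) j)
  else 0
termination_by s.length / 2 - i

theorem pvAdvance_ge (s : List Int) (x : Int) (j : Nat) : j ≤ pvAdvance s x j := by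
  rw [pvAdvance]
  split
  next h => have := pvAdvance_ge s x (j + 1); omega
  next h => omega
termination_by s.length - j
decreasing_by omega

theorem pvAdvance_le_length (s : List Int) (x : Int) (j : Nat) (hj : j ≤ s.length) :
    pvAdvance s x j ≤ s.length := by
  rw [pvAdvance]
  split
  next h => exact pvAdvance_le_length s x (j + 1) (by omega)
  next h => exact hj
termination_by s.length - j
decreasing_by omega

theorem pvAdvance_le (s : List Int) (x : Int) (j p : Nat) (hjp : j ≤ p)
    (hp : x * 2 ≤ s.getD p 0) : pvAdvance s x j ≤ p := by
  rw [pvAdvance]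
  split
  next h =>
    have hne : j ≠ p := by intro e; subst e; omega
    exact pvAdvance_le s x (j + 1) p (by omega) hp
  next h => exact hjp
termination_by s.length - j
decreasing_by omega

theorem pvAdvance_stop (s : List Int) (x : Int) (j : Nat)
    (h : pvAdvance s x j < s.length) : x * 2 ≤ s.getD (pvAdvance s x j) 0 := by
  by_cases hc : j < s.length ∧ s.getD j 0 < x * 2
  · rw [pvAdvance, dif_pos hc] at h ⊢
    exact pvAdvance_stop s x (j + 1) h
  · rw [pvAdvance, dif_neg hc] at h ⊢
    omega
termination_by s.length - j
decreasing_by omega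

theorem pvALoop_eq (s : List Int) (i j : Nat) (res : Int) :
    pvALoop s i j res = res + 2 * (pvG s i j : Int) := by
  rw [pvALoop, pvG]
  by_cases hi : i < s.length / 2
  · rw [if_pos hi, if_pos hi]
    by_cases hj : pvAdvance s (s.getD i 0) j < s.length
    · rw [if_pos hj, if_pos hj, pvALoop_eq]; push_cast; ring
    · rw [if_neg hj, if_neg hj, pvALoop_eq]
  · rw [if_neg hi, if_neg hi]; simp
termination_by s.length / 2 - i
decreasing_by all_goals omega

theorem pvG_le (s : List Int) (i j : Nat) : pvG s i j ≤ s.length / 2 - i := by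
  rw [pvG]
  by_cases hi : i < s.length / 2
  · rw [if_pos hi]
    split
    · have := pvG_le s (i + 1) (pvAdvance s (s.getD i 0) j + 1); omega
    · have := pvG_le s (i + 1) (pvAdvance s (s.getD i 0) j); omega
  · rw [if_neg hi]; omega
termination_by s.length / 2 - i
decreasing_by all_goals omega

theorem pvG_bound (s : List Int) (i j : Nat) (h : j ≤ s.length) :
    j + pvG s i j ≤ s.length := by
  rw [pvG]
  by_cases hi : i < s.length / 2
  · rw [if_pos hi]
    have hadv := pvAdvance_ge s (s.getD i 0) j
    have hlen := pvAdvance_le_length s (s.getD i 0) j h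
    split
    next hj => have := pvG_bound s (i + 1) (pvAdvance s (s.getD i 0) j + 1) (by omega); omega
    next hj => have := pvG_bound s (i + 1) (pvAdvance s (s.getD i 0) j) (by omega); omega
  · rw [if_neg hi]; omega
termination_by s.length / 2 - i
decreasing_by all_goals omega

theorem sorted_getD_mono (s : List Int) (hs : s.Pairwise (· ≤ ·)) (a b : Nat)
    (hab : a ≤ b) (hb : b < s.length) : s.getD a 0 ≤ s.getD b 0 := by
  rcases Nat.lt_or_ge a b with h | h
  · have ha : a < s.length := by omega
    rw [List.getD_eq_getElem s 0 ha, List.getD_eq_getElem s 0 hb]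
    exact List.pairwise_iff_getElem.mp hs a b ha hb h
  · have : a = b := by omega
    rw [this]

-- the greedy's own count is feasible for B's fixed pairing
theorem pvG_feasible (s : List Int) (hs : s.Pairwise (· ≤ ·)) (i j : Nat) (hj : j ≤ s.length) :
    ∀ t < pvG s i j, 2 * s.getD (i + t) 0 ≤ s.getD (s.length - pvG s i j + t) 0 := by
  intro t ht
  rw [pvG] at ht ⊢
  by_cases hi : i < s.length / 2
  · rw [if_pos hi] at ht ⊢
    have hlen := pvAdvance_le_length s (s.getD i 0) j hj
    by_cases hj' : pvAdvance s (s.getD i 0) j < s.length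
    · rw [if_pos hj'] at ht ⊢
      have hG' := pvG_bound s (i + 1) (pvAdvance s (s.getD i 0) j + 1) (by omega)
      cases t with
      | zero =>
        have hstop := pvAdvance_stop s (s.getD i 0) j hj'
        have hmono := sorted_getD_mono s hs (pvAdvance s (s.getD i 0) j)
          (s.length - (pvG s (i + 1) (pvAdvance s (s.getD i 0) j + 1) + 1) + 0)
          (by omega) (by omega)
        have : i + 0 = i := rfl
        rw [this]
        linarith
      | succ t' =>
        have IH := pvG_feasible s hs (i + 1) (pvAdvance s (s.getD i 0) j + 1) (by omega) t' (by omega)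
        have e1 : i + (t' + 1) = i + 1 + t' := by omega
        have e2 : s.length - (pvG s (i + 1) (pvAdvance s (s.getD i 0) j + 1) + 1) + (t' + 1)
            = s.length - pvG s (i + 1) (pvAdvance s (s.getD i 0) j + 1) + t' := by omega
        rw [e1, e2]; exact IH
    · rw [if_neg hj'] at ht
      have h0 := pvG_bound s (i + 1) (pvAdvance s (s.getD i 0) j) (by omega)
      omega
  · rw [if_neg hi] at ht; omega
termination_by s.length / 2 - i
decreasing_by all_goals omega

-- any feasible k is achieved by the greedy
theorem pvG_lb (s : List Int) :
    ∀ (k i j : Nat), i + k ≤ s.length / 2 → j + k ≤ s.length →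
    (∀ t < k, 2 * s.getD (i + t) 0 ≤ s.getD (s.length - k + t) 0) → k ≤ pvG s i j := by
  intro k
  induction k with
  | zero => intro i j _ _ _; omega
  | succ k' IH =>
    intro i j h1 h2 h3
    have hi : i < s.length / 2 := by omega
    have h0 := h3 0 (by omega)
    have hadv : pvAdvance s (s.getD i 0) j ≤ s.length - (k' + 1) := by
      apply pvAdvance_le s _ j _ (by omega)
      have e : s.length - (k' + 1) + 0 = s.length - (k' + 1) := by omega
      rw [e] at h0
      have e0 : i + 0 = i := rfl
      rw [e0] at h0
      linarith
    have hj' : pvAdvance s (s.getD i 0) j < s.length := by omega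
    rw [pvG, if_pos hi, if_pos hj']
    have harg : ∀ t < k', 2 * s.getD (i + 1 + t) 0 ≤ s.getD (s.length - k' + t) 0 := by
      intro t ht
      have h4 := h3 (t + 1) (by omega)
      have e1 : i + (t + 1) = i + 1 + t := by omega
      have e2 : s.length - (k' + 1) + (t + 1) = s.length - k' + t := by omega
      rw [e1, e2] at h4; exact h4
    have := IH (i + 1) (pvAdvance s (s.getD i 0) j + 1) (by omega) (by omega) harg
    omega

theorem pvFeasible_iff (s : List Int) (k : Nat) :
    pvFeasible s k = true ↔ ∀ t < k, 2 * s.getD t 0 ≤ s.getD (s.length - k + t) 0 := by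
  simp [pvFeasible]

theorem pvFeasible_mono (s : List Int) (hs : s.Pairwise (· ≤ ·)) (k l : Nat)
    (hkl : k ≤ l) (hl : l ≤ s.length) (hf : pvFeasible s l = true) : pvFeasible s k = true := by
  rw [pvFeasible_iff] at hf ⊢
  intro t ht
  have h1 := hf t (by omega)
  have h2 := sorted_getD_mono s hs (s.length - l + t) (s.length - k + t) (by omega) (by omega)
  linarith

theorem pvBScan_le (s : List Int) (m : Nat) : pvBScan s m ≤ m := by
  induction m with
  | zero => simp [pvBScan]
  | succ m ih => rw [pvBScan]; split <;> omega

theorem pvBScan_feasible (s : List Int) (m : Nat) : pvFeasible s (pvBScan s m) = true := by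
  induction m with
  | zero => simp [pvBScan, pvFeasible]
  | succ m ih =>
    rw [pvBScan]
    split
    next h => exact h
    next h => exact ih

theorem pvBScan_ge (s : List Int) (k : Nat) (hf : pvFeasible s k = true) :
    ∀ m, k ≤ m → k ≤ pvBScan s m := by
  intro m
  induction m with
  | zero => intro h; simp [pvBScan]; omega
  | succ m ih =>
    intro h
    rw [pvBScan]
    split
    next _ => omega
    next hne =>
      have : k ≠ m + 1 := fun e => hne (e ▸ hf)
      exact ih (by omega)

theorem pvG_eq_pvBScan (s : List Int) (hs : s.Pairwise (· ≤ ·)) :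
    pvG s 0 (s.length / 2) = pvBScan s (s.length / 2) := by
  have hmid : s.length / 2 ≤ s.length := by omega
  have hgle : pvG s 0 (s.length / 2) ≤ s.length / 2 := by
    have := pvG_le s 0 (s.length / 2); omega
  have hfeasg : pvFeasible s (pvG s 0 (s.length / 2)) = true := by
    rw [pvFeasible_iff]
    intro t ht
    have := pvG_feasible s hs 0 (s.length / 2) hmid t ht
    simpa using this
  have h1 : pvG s 0 (s.length / 2) ≤ pvBScan s (s.length / 2) :=
    pvBScan_ge s _ hfeasg _ hgle
  have h2 : pvBScan s (s.length / 2) ≤ pvG s 0 (s.length / 2) := by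
    rcases Nat.lt_or_ge (pvG s 0 (s.length / 2)) (pvBScan s (s.length / 2)) with hlt | hge
    · have hb_le := pvBScan_le s (s.length / 2)
      have hbf := pvBScan_feasible s (s.length / 2)
      have hfeas : pvFeasible s (pvG s 0 (s.length / 2) + 1) = true :=
        pvFeasible_mono s hs _ _ (by omega) (by omega) hbf
      rw [pvFeasible_iff] at hfeas
      have harg : ∀ t < pvG s 0 (s.length / 2) + 1,
          2 * s.getD (0 + t) 0 ≤ s.getD (s.length - (pvG s 0 (s.length / 2) + 1) + t) 0 := by
        intro t ht
        simpa using hfeas t ht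
      have := pvG_lb s (pvG s 0 (s.length / 2) + 1) 0 (s.length / 2) (by omega) (by omega) harg
      omega
    · exact hge
  omega

-- ===== VERDICT (by name: the statement is the Claim_ definition above) =====
theorem maxNumOfMarkedIndices_spec : Claim_equal_maxNumOfMarkedIndices := by
  intro nums _
  unfold Spec_maxNumOfMarkedIndices maxNumOfMarkedIndices maxNumOfMarkedIndices_alt
  have hs : (PySem.List.sorted nums (fun x => x) false).Pairwise (· ≤ ·) :=
    PySem.List.sorted_pairwise nums (fun x => x)
  rw [pvALoop_eq, pvG_eq_pvBScan _ hs]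
  ring
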